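-- pv_equiv track=rewrite | github.com/tvishwanadha/advent_of_code_2025 | packages/day_10/src/day_10/solution.py | solve_machine_brute_force
-- ===== SOURCE A (Python) =====
-- from itertools import product
--
-- def solve_machine_brute_force(target: list[int], buttons: list[list[int]]) -> int:
--     """
--     Find minimum button presses using brute force for small cases.
--     Since pressing a button twice cancels out, we only need to try 0 or 1 presses.
--     """
--     n_buttons = len(buttons)
--     n_lights = len(target)
--     min_presses = n_buttons + 1  # More than maximum possible
--
--     # Try all 2^n combinations of button presses
--     for combo in product([0, 1], repeat=n_buttons):
--         # Calculate the resulting light state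
--         state = [0] * n_lights
--         for i, pressed in enumerate(combo):
--             if pressed:
--                 for j in range(n_lights):
--                     state[j] ^= buttons[i][j]
--
--         # Check if this matches the target
--         if state == target:
--             presses = sum(combo)
--             min_presses = min(min_presses, presses)
--
--     return min_presses if min_presses <= n_buttons else -1
-- ===== SOURCE B (Python) =====
-- def solve_machine_brute_force(target: list[int], buttons: list[list[int]]) -> int:
--     """Minimum button presses: branch-and-recurse over the buttons, carrying the
--     XOR state along, instead of materialising all 2^n press combinations."""
--     n_lights = len(target)
--
--     def best(bs, state):
--         # minimum presses using a subset of bs so that `state` becomes target, or None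
--         if not bs:
--             return 0 if state == target else None
--         skip = best(bs[1:], state)
--         pressed = list(state)
--         for j in range(n_lights):
--             pressed[j] ^= bs[0][j]
--         take = best(bs[1:], pressed)
--         if take is not None:
--             take += 1
--         if skip is None:
--             return take
--         if take is None:
--             return skip
--         return min(skip, take)
--
--     res = best(buttons, [0] * n_lights)
--     return -1 if res is None else res
-- ===== Notes on version B (the rewrite author's own statement) =====
-- stated objective: alternative
-- what changed: Replaced the itertools.product enumeration that recomputes each light state from scratch with a press/skip recursion over the buttons that carries the running XOR state, so each of the 2^n leaves reuses its prefix's state instead of replaying up to n button loops.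
import Mathlib
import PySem

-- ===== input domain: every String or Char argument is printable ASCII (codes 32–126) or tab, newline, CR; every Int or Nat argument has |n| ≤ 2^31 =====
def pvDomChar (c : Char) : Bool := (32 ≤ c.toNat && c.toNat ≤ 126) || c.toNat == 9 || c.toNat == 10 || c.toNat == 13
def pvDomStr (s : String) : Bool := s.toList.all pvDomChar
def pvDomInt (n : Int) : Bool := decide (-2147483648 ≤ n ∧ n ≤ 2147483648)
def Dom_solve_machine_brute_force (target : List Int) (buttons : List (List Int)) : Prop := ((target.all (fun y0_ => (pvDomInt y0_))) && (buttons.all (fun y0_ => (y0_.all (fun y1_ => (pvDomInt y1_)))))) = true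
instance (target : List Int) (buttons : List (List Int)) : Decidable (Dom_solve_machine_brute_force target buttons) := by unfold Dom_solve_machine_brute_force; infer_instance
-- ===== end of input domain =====

-- B replaces A's itertools.product enumeration (state recomputed from scratch per combo)
-- with a press/skip recursion over the buttons carrying the running XOR state (alternative decomposition).


-- ===== PORT A =====
-- inner loop `for j in range(n_lights): state[j] ^= buttons[i][j]`
def pvPressLoopA (nLights : Nat) (state : List Int) (button : List Int) : List Int :=
  (List.range nLights).foldl
    (fun s j => s.set j (PySem.Int.bxor (s.getD j 0) (PySem.List.pyGetD button (Int.ofNat j) 0))) state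

-- `state = [0]*n_lights; for i, pressed in enumerate(combo): if pressed: <inner loop>`
def pvStateOf (buttons : List (List Int)) (nLights : Nat) (combo : List Int) : List Int :=
  (PySem.List.enumerate combo).foldl
    (fun st ip => if ip.2 ≠ 0 then pvPressLoopA nLights st (PySem.List.pyGetD buttons ip.1 []) else st)
    (List.replicate nLights 0)

-- `itertools.product([0,1], repeat=n)` in iteration order (first coordinate slowest)
def pvCombos : Nat → List (List Int)
  | 0 => [[]]
  | n + 1 => (pvCombos n).map (fun c => 0 :: c) ++ (pvCombos n).map (fun c => 1 :: c)

def solve_machine_brute_force (target : List Int) (buttons : List (List Int)) : Int :=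
  let nButtons := buttons.length
  let minPresses :=
    (pvCombos nButtons).foldl
      (fun acc c => if pvStateOf buttons target.length c = target then min acc c.sum else acc)
      ((nButtons : Int) + 1)
  if minPresses ≤ (nButtons : Int) then minPresses else -1

-- ===== PORT B =====
-- inner loop `for j in range(n_lights): pressed[j] ^= bs[0][j]`
def pvPressLoopB (nLights : Nat) (state : List Int) (button : List Int) : List Int :=
  (List.range nLights).foldl
    (fun s j => s.set j (PySem.Int.bxor (s.getD j 0) (PySem.List.pyGetD button (Int.ofNat j) 0))) state

-- `best(bs, state)`: minimum presses using a subset of bs, or None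
def pvBest (target : List Int) (nLights : Nat) : List (List Int) → List Int → Option Int
  | [], state => if state = target then some 0 else none
  | b :: bs, state =>
      let skip := pvBest target nLights bs state
      let take := (pvBest target nLights bs (pvPressLoopB nLights state b)).map (· + 1)
      match skip, take with
      | none, t => t
      | some s, none => some s
      | some s, some t => some (min s t)

def solve_machine_brute_force_alt (target : List Int) (buttons : List (List Int)) : Int :=
  match pvBest target target.length buttons (List.replicate target.length 0) with
  | none => -1
  | some r => r

-- ===== PRECONDITION & SPEC =====
-- Pre_ excludes exactly the inputs where Python A raises IndexError: some button row
-- shorter than the target (and the target nonempty makes the access happen; length 0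
-- makes the bound vacuous, matching Python).
def Pre_solve_machine_brute_force (target : List Int) (buttons : List (List Int)) : Prop :=
  ∀ b ∈ buttons, target.length ≤ b.length
instance (target : List Int) (buttons : List (List Int)) : Decidable (Pre_solve_machine_brute_force target buttons) := by unfold Pre_solve_machine_brute_force; infer_instance

def pvWitness_solve_machine_brute_force : List Int × List (List Int) := ([1, 0], [[1, 1], [0, 1]])

def Spec_solve_machine_brute_force (target : List Int) (buttons : List (List Int)) (out : Int) : Prop := out = solve_machine_brute_force_alt target buttons
instance (target : List Int) (buttons : List (List Int)) (out : Int) : Decidable (Spec_solve_machine_brute_force target buttons out) := by unfold Spec_solve_machine_brute_force; infer_instance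

-- ===== CLAIM (what is proved, stated in full; the proofs are below) =====
def Claim_equal_solve_machine_brute_force : Prop := ∀ (target : List Int) (buttons : List (List Int)), Dom_solve_machine_brute_force target buttons → Pre_solve_machine_brute_force target buttons → Spec_solve_machine_brute_force target buttons (solve_machine_brute_force target buttons)

-- ===== LEMMAS AND PROOFS =====

theorem pvPress_eq : pvPressLoopA = pvPressLoopB := rfl

theorem pvCombos_length {n : Nat} {c : List Int} (h : c ∈ pvCombos n) : c.length = n := by
  induction n generalizing c with
  | zero => simp [pvCombos] at h; subst h; rfl
  | succ m ih =>
      simp only [pvCombos, List.mem_append, List.mem_map] at h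
      rcases h with ⟨d, hd, rfl⟩ | ⟨d, hd, rfl⟩ <;> simp [ih hd]


-- A's enumerate-and-index loop equals a fold over the zip of the combo with the buttons.
theorem pvEnumFold (press : List Int → List Int → List Int) :
    ∀ (c : List Int) (bs : List (List Int)) (s : Nat), c.length + s ≤ bs.length → ∀ st,
    (PySem.List.enumerate c (s : Int)).foldl
        (fun st ip => if ip.2 ≠ 0 then press st (PySem.List.pyGetD bs ip.1 []) else st) st
      = (c.zip (bs.drop s)).foldl
        (fun st pb => if pb.1 ≠ 0 then press st pb.2 else st) st := by
  intro c
  induction c with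
  | nil => intro bs s _ st; simp [PySem.List.enumerate_nil]
  | cons p c ih =>
      intro bs s hlen st
      have hs : s < bs.length := by simp at hlen; omega
      rw [PySem.List.enumerate_cons]
      have hdrop : bs.drop s = bs[s] :: bs.drop (s + 1) := List.drop_eq_getElem_cons hs
      have hget : PySem.List.pyGetD bs (s : Int) [] = bs[s] := by
        rw [PySem.List.pyGetD_natCast, List.getD_eq_getElem]
      simp only [List.foldl_cons, hdrop, List.zip_cons_cons, hget]
      have : ((s : Int) + 1) = ((s + 1 : Nat) : Int) := by push_cast; ring
      rw [this, ih bs (s + 1) (by simp at hlen ⊢; omega)]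

-- The brute-force fold over all combos equals the press/skip recursion.
theorem pvMain (target : List Int) (nl : Nat) :
    ∀ (bs : List (List Int)) (st : List Int) (k acc : Int),
    (pvCombos bs.length).foldl
        (fun a c =>
          if (c.zip bs).foldl (fun st pb => if pb.1 ≠ 0 then pvPressLoopB nl st pb.2 else st) st = target
          then min a (k + c.sum) else a) acc
      = match pvBest target nl bs st with
        | none => acc
        | some m => min acc (k + m) := by
  intro bs
  induction bs with
  | nil =>
      intro st k acc
      simp only [List.length_nil, pvCombos, pvBest, List.foldl_cons, List.foldl_nil,
        List.zip_nil_right]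
      split_ifs with h <;> simp
  | cons b bs ih =>
      intro st k acc
      simp only [List.length_cons, pvCombos, List.foldl_append, List.foldl_map]
      have h0 :
          (pvCombos bs.length).foldl
              (fun a c =>
                if ((0 :: c).zip (b :: bs)).foldl
                    (fun st pb => if pb.1 ≠ 0 then pvPressLoopB nl st pb.2 else st) st = target
                then min a (k + (0 :: c).sum) else a) acc
            = match pvBest target nl bs st with
              | none => acc
              | some m => min acc (k + m) := by
        rw [← ih st k acc]
        apply PySem.List.foldl_congr_mem
        intro a c _
        simp
      rw [h0]
      have h1 :
          ∀ acc2,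
          (pvCombos bs.length).foldl
              (fun a c =>
                if ((1 :: c).zip (b :: bs)).foldl
                    (fun st pb => if pb.1 ≠ 0 then pvPressLoopB nl st pb.2 else st) st = target
                then min a (k + (1 :: c).sum) else a) acc2
            = match pvBest target nl bs (pvPressLoopB nl st b) with
              | none => acc2
              | some m => min acc2 (k + 1 + m) := by
        intro acc2
        rw [← ih (pvPressLoopB nl st b) (k + 1) acc2]
        apply PySem.List.foldl_congr_mem
        intro a c _
        simp only [List.zip_cons_cons, List.foldl_cons, List.sum_cons]
        norm_num
        ring_nf
      rw [h1]
      show _ = match pvBest target nl (b :: bs) st with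
               | none => acc
               | some m => min acc (k + m)
      simp only [pvBest]
      rcases hskip : pvBest target nl bs st with _ | m <;>
        rcases htake : pvBest target nl bs (pvPressLoopB nl st b) with _ | t <;>
        simp
      · have h2 : k + (t + 1) = k + 1 + t := by ring
        rw [h2]
      · rw [min_def, min_def, min_def, min_def]
        split_ifs <;> omega

theorem pvBest_bound (target : List Int) (nl : Nat) :
    ∀ (bs : List (List Int)) (st : List Int) (m : Int),
    pvBest target nl bs st = some m → 0 ≤ m ∧ m ≤ bs.length := by
  intro bs
  induction bs with
  | nil =>
      intro st m h
      simp only [pvBest] at h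
      split_ifs at h <;> simp_all
  | cons b bs ih =>
      intro st m h
      simp only [pvBest] at h
      rcases hskip : pvBest target nl bs st with _ | s <;>
        rcases htake : pvBest target nl bs (pvPressLoopB nl st b) with _ | t <;>
        simp_all
      · have := ih _ _ htake; omega
      · have := ih _ _ hskip; omega
      · have h1 := ih _ _ hskip
        have h2 := ih _ _ htake
        rcases h with rfl
        rcases min_choice (s : Int) (t + 1) with h3 | h3 <;> rw [h3] <;> constructor <;> omega

-- ===== VERDICT (by name: the statement is the Claim_ definition above) =====
theorem solve_machine_brute_force_spec : Claim_equal_solve_machine_brute_force := by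
  intro target buttons _dom _pre
  unfold Spec_solve_machine_brute_force solve_machine_brute_force solve_machine_brute_force_alt
  have hfold :
      (pvCombos buttons.length).foldl
          (fun acc c => if pvStateOf buttons target.length c = target then min acc c.sum else acc)
          ((buttons.length : Int) + 1)
        = match pvBest target target.length buttons (List.replicate target.length 0) with
          | none => (buttons.length : Int) + 1
          | some m => min ((buttons.length : Int) + 1) (0 + m) := by
    rw [← pvMain target target.length buttons (List.replicate target.length 0) 0
          ((buttons.length : Int) + 1)]
    apply PySem.List.foldl_congr_mem
    intro a c hc
    have hlen : c.length = buttons.length := pvCombos_length hc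
    have hz := pvEnumFold (pvPressLoopB target.length) c buttons 0 (by omega)
      (List.replicate target.length 0)
    simp only [Nat.cast_zero, List.drop_zero] at hz
    unfold pvStateOf
    rw [pvPress_eq, hz]
    simp
  show (if (pvCombos buttons.length).foldl
        (fun acc c => if pvStateOf buttons target.length c = target then min acc c.sum else acc)
        ((buttons.length : Int) + 1) ≤ (buttons.length : Int)
      then (pvCombos buttons.length).foldl
        (fun acc c => if pvStateOf buttons target.length c = target then min acc c.sum else acc)
        ((buttons.length : Int) + 1)
      else -1)
    = match pvBest target target.length buttons (List.replicate target.length 0) with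
      | none => -1
      | some r => r
  rw [hfold]
  rcases hb : pvBest target target.length buttons (List.replicate target.length 0) with _ | m
  · have h1 : ¬ ((buttons.length : Int) + 1 ≤ (buttons.length : Int)) := by omega
    simp [h1]
  · have hbd := pvBest_bound target target.length buttons _ _ hb
    have hmin : min ((buttons.length : Int) + 1) (0 + m) = m := by omega
    have h2 : m ≤ (buttons.length : Int) := hbd.2
    simp [h2]
    omega
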